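-- pv_equiv track=rewrite | github.com/m1ha5/sfox_toolkit | src/sfox_trader/lib/pair_utils.py | pair_base
-- ===== SOURCE A (Python) =====
-- QUOTE_SUFFIXES = (
-- 	"usdc",
-- 	"usdt",
-- 	"usd",
-- 	"eur",
-- 	"gbp",
-- 	"aud",
-- 	"cad",
-- 	"jpy",
-- 	"chf",
-- 	"try",
-- 	"nzd",
-- 	"sek",
-- 	"czk",
-- 	"pln",
-- 	"hkd",
-- 	"sgd",
-- 	"inr",
-- 	"brl",
-- 	"mxn",
-- )
--
-- def pair_base(sym: str) -> str | None:
-- 	"""Base asset id from a pair string (e.g. ethusd -> eth). None if quote unknown."""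
-- 	s = (sym or "").lower().strip().replace("/", "")
-- 	if not s:
-- 		return None
-- 	for q in QUOTE_SUFFIXES:
-- 		if len(s) > len(q) and s.endswith(q):
-- 			return s[: -len(q)]
-- 	return None
-- ===== SOURCE B (Python) =====
-- FOUR_QUOTES = {"usdc", "usdt"}
-- THREE_QUOTES = {
--     "usd", "eur", "gbp", "aud", "cad", "jpy", "chf", "try", "nzd",
--     "sek", "czk", "pln", "hkd", "sgd", "inr", "brl", "mxn",
-- }
--
-- def pair_base(sym: str) -> str | None:
--     """Base asset id from a pair string (e.g. ethusd -> eth). None if quote unknown."""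
--     s = (sym or "").lower().strip().replace("/", "")
--     if not s:
--         return None
--     if len(s) > 4 and s[-4:] in FOUR_QUOTES:
--         return s[:-4]
--     if len(s) > 3 and s[-3:] in THREE_QUOTES:
--         return s[:-3]
--     return None
-- ===== Notes on version B (the rewrite author's own statement) =====
-- stated objective: simpler
-- what changed: A's linear scan over all 19 quote suffixes (with endswith per suffix) is replaced by two length-bucketed set lookups: test the last 4 chars against {usdc, usdt}, then the last 3 chars against the 17 three-char quotes; the suffix loop disappears.
import Mathlib
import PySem

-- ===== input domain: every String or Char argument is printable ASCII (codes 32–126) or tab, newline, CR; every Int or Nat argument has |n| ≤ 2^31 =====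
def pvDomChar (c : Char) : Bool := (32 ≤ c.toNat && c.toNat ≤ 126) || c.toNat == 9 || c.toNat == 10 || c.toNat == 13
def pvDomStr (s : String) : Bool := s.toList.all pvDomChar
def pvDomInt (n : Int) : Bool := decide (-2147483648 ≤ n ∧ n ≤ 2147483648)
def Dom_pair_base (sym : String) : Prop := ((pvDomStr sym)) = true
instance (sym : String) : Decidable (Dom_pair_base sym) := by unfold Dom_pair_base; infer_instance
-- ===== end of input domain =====

-- B replaces A's linear scan over all 19 quote suffixes by two length-bucketed set lookups
-- (4-char suffixes, then 3-char suffixes); objective: simpler (return value only; no mutation).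

-- ===== PORT A =====
def pvQuoteSuffixes : List (List Char) :=
  ["usdc".toList, "usdt".toList, "usd".toList, "eur".toList, "gbp".toList, "aud".toList,
   "cad".toList, "jpy".toList, "chf".toList, "try".toList, "nzd".toList, "sek".toList,
   "czk".toList, "pln".toList, "hkd".toList, "sgd".toList, "inr".toList, "brl".toList,
   "mxn".toList]

-- the 'for q in QUOTE_SUFFIXES' loop of A
def pvLoopA (s : List Char) : List (List Char) → Option (List Char)
  | [] => none
  | q :: rest =>
    if q.length < s.length && PySem.Chars.endswith s q then
      some (PySem.List.slice s none (some (-(q.length : Int))))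
    else pvLoopA s rest

def pair_base (sym : String) : Option String :=
  let s := PySem.Chars.replace (PySem.Chars.strip (PySem.Chars.lower sym.toList)) "/".toList "".toList
  if s = [] then none
  else (pvLoopA s pvQuoteSuffixes).map String.ofList

-- ===== PORT B =====
def pvFourQuotes : PySem.Set (List Char) :=
  PySem.Set.ofList ["usdc".toList, "usdt".toList]

def pvThreeQuotes : PySem.Set (List Char) :=
  PySem.Set.ofList ["usd".toList, "eur".toList, "gbp".toList, "aud".toList, "cad".toList,
   "jpy".toList, "chf".toList, "try".toList, "nzd".toList, "sek".toList, "czk".toList,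
   "pln".toList, "hkd".toList, "sgd".toList, "inr".toList, "brl".toList, "mxn".toList]

def pair_base_alt (sym : String) : Option String :=
  let s := PySem.Chars.replace (PySem.Chars.strip (PySem.Chars.lower sym.toList)) "/".toList "".toList
  if s = [] then none
  else if 4 < s.length && PySem.Set.contains pvFourQuotes (PySem.List.slice s (some (-4)) none) then
    some (String.ofList (PySem.List.slice s none (some (-4))))
  else if 3 < s.length && PySem.Set.contains pvThreeQuotes (PySem.List.slice s (some (-3)) none) then
    some (String.ofList (PySem.List.slice s none (some (-3))))
  else none

-- ===== PRECONDITION & SPEC =====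
def Spec_pair_base (sym : String) (out : Option String) : Prop := out = pair_base_alt sym
instance (sym : String) (out : Option String) : Decidable (Spec_pair_base sym out) := by unfold Spec_pair_base; infer_instance

-- ===== CLAIM (what is proved, stated in full; the proofs are below) =====
def Claim_equal_pair_base : Prop := ∀ (sym : String), Dom_pair_base sym → Spec_pair_base sym (pair_base sym)

-- ===== LEMMAS AND PROOFS =====

-- endswith as an equality on the dropped tail (specific bridge used by both group arguments)
lemma endswith_eq_drop (s q : List Char) :
    PySem.Chars.endswith s q = (s.drop (s.length - q.length) == q) := by
  rw [Bool.eq_iff_iff, PySem.Chars.endswith_iff, beq_iff_eq]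
  constructor
  · rintro ⟨t, rfl⟩; simp
  · intro h; rw [← h]; exact List.drop_suffix _ _

-- A's loop over a block of 3-char suffixes is a membership test on the last 3 chars
lemma loopA_three (s : List Char) (h3 : 3 < s.length) (qs : List (List Char))
    (hq : ∀ q ∈ qs, q.length = 3) :
    pvLoopA s qs =
      if qs.contains (s.drop (s.length - 3)) then some (s.take (s.length - 3)) else none := by
  induction qs with
  | nil => simp [pvLoopA]
  | cons q rest ih =>
    have hql : q.length = 3 := hq q (by simp)
    rw [pvLoopA, ih (fun q hm => hq q (by simp [hm])), endswith_eq_drop,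
        PySem.List.slice_to_neg_natCast s q.length (by omega)]
    simp only [hql]
    by_cases hb : s.drop (s.length - 3) = q
    · simp [hb, h3]
    · simp [hb, h3]

lemma loopA_short (s : List Char) (h3 : ¬ 3 < s.length) (qs : List (List Char))
    (hq : ∀ q ∈ qs, 3 ≤ q.length) : pvLoopA s qs = none := by
  induction qs with
  | nil => rfl
  | cons q rest ih =>
    have := hq q (by simp)
    rw [pvLoopA, if_neg, ih (fun q hm => hq q (by simp [hm]))]
    simp; omega

-- ===== VERDICT (by name: the statement is the Claim_ definition above) =====
theorem pair_base_spec : Claim_equal_pair_base := by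
  intro sym _
  unfold Spec_pair_base pair_base pair_base_alt
  set s := PySem.Chars.replace (PySem.Chars.strip (PySem.Chars.lower sym.toList)) "/".toList "".toList with hs
  have hF : pvFourQuotes = ["usdc".toList, "usdt".toList] := by decide
  have hT : pvThreeQuotes = ["usd".toList, "eur".toList, "gbp".toList, "aud".toList,
      "cad".toList, "jpy".toList, "chf".toList, "try".toList, "nzd".toList, "sek".toList,
      "czk".toList, "pln".toList, "hkd".toList, "sgd".toList, "inr".toList, "brl".toList,
      "mxn".toList] := by decide
  by_cases hnil : s = []
  · simp [hnil]
  rw [if_neg hnil, if_neg hnil, hF, hT,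
      pvQuoteSuffixes, pvLoopA, pvLoopA, endswith_eq_drop, endswith_eq_drop]
  simp only [show ("usdc".toList).length = 4 from rfl, show ("usdt".toList).length = 4 from rfl]
  by_cases h3 : 3 < s.length
  · rw [loopA_three s h3 _ (by decide),
        PySem.List.slice_from_neg_ofNat s 4 (by norm_num),
        PySem.List.slice_from_neg_ofNat s 3 (by norm_num),
        PySem.List.slice_to_neg_ofNat s 4 (by norm_num),
        PySem.List.slice_to_neg_ofNat s 3 (by norm_num),
        PySem.List.slice_to_neg_natCast s 4 (by omega)]
    by_cases h4 : 4 < s.length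
    · by_cases hc : s.drop (s.length - 4) = ['u','s','d','c']
      · simp [hc, h4, PySem.Set.contains]
      · by_cases ht : s.drop (s.length - 4) = ['u','s','d','t']
        · simp [ht, h4, PySem.Set.contains]
        · rw [apply_ite (Option.map String.ofList)]
          simp [hc, ht, h3, h4, PySem.Set.contains]
    · simp [h3, h4, PySem.Set.contains]
  · rw [loopA_short s h3 _ (by decide)]
    have h4 : ¬ 4 < s.length := by omega
    simp [h3, h4]
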